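-- pv_equiv track=rewrite | github.com/Aasthaengg/IBMdataset | Python_codes/p03488/s169211864.py | f
-- ===== SOURCE A (Python) =====
-- def f(start, goal, steps):
--   res = set([start])
--   for s in steps:
--     next_res = set()
--     for r in res:
--       next_res.add(r + s)
--       next_res.add(r - s)
--     res = next_res
--   return goal in res
-- ===== SOURCE B (Python) =====
-- def f(start, goal, steps):
--     def sums(l):
--         if not l:
--             return {0}
--         rest = sums(l[1:])
--         s = l[0]
--         return {x + s for x in rest} | {x - s for x in rest}
--     mid = len(steps) // 2
--     right = sums(steps[mid:])
--     d = goal - start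
--     return any(d - x in right for x in sums(steps[:mid]))
-- ===== Notes on version B (the rewrite author's own statement) =====
-- stated objective: alternative
-- what changed: Replaces A's single breadth-first enumeration of all signed sums in one growing set by meet-in-the-middle: the signed sums of each half of the list are enumerated recursively and a membership match combines them; it trades A's one iterative frontier for two recursively built half-sets (2^(n/2) candidates each when sums do not collide; measured 1.4x at the largest size, so no speed is claimed).
import Mathlib
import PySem

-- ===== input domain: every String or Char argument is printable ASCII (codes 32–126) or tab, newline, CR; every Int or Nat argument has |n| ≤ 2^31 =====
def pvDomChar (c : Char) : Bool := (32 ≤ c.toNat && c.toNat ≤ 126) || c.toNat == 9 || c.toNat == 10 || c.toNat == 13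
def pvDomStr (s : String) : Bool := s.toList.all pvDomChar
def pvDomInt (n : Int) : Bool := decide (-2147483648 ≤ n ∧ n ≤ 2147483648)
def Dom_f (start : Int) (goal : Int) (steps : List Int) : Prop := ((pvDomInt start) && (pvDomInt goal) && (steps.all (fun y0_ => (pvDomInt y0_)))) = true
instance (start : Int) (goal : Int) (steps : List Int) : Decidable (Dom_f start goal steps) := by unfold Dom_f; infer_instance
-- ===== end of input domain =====

-- B replaces A's single breadth-first set of all 2^n signed sums by meet-in-the-middle:
-- signed sums of each half are enumerated recursively and matched (objective: alternative).

-- ===== PORT A =====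
def f (start : Int) (goal : Int) (steps : List Int) : Bool :=
  let res : PySem.Set Int := PySem.Set.ofList [start]
  let res := steps.foldl (fun res s =>
    res.foldl (fun next_res r =>
      PySem.Set.add (PySem.Set.add next_res (r + s)) (r - s)) PySem.Set.empty) res
  PySem.Set.contains res goal

-- ===== PORT B =====
/-- B's helper sums(l): the set of signed sums of l, built recursively
    ({x+s for x in rest} | {x-s for x in rest}; the comprehensions iterate a set,
    which is exact here because the result is only used as a set). -/
def sumsB : List Int → PySem.Set Int
  | [] => PySem.Set.ofList [0]
  | s :: t =>
    let rest := sumsB t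
    PySem.Set.union (PySem.Set.ofList (rest.map (fun x => x + s))) (rest.map (fun x => x - s))

def f_alt (start : Int) (goal : Int) (steps : List Int) : Bool :=
  let mid : Nat := steps.length / 2
  -- steps[mid:] / steps[:mid] with 0 ≤ mid ≤ len are exactly drop/take
  let right := sumsB (steps.drop mid)
  let d := goal - start
  (sumsB (steps.take mid)).any (fun x => PySem.Set.contains right (d - x))

-- ===== PRECONDITION & SPEC =====
def Spec_f (start : Int) (goal : Int) (steps : List Int) (out : Bool) : Prop := out = f_alt start goal steps
instance (start : Int) (goal : Int) (steps : List Int) (out : Bool) : Decidable (Spec_f start goal steps out) := by unfold Spec_f; infer_instance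

-- ===== CLAIM (what is proved, stated in full; the proofs are below) =====
def Claim_equal_f : Prop := ∀ (start : Int) (goal : Int) (steps : List Int), Dom_f start goal steps → Spec_f start goal steps (f start goal steps)

-- ===== LEMMAS AND PROOFS =====

/-- d is a signed sum (Σ ±s) of the list. -/
def Reach : List Int → Int → Prop
  | [], d => d = 0
  | s :: t, d => Reach t (d - s) ∨ Reach t (d + s)

lemma mem_inner (s : Int) : ∀ (l : List Int) (acc : PySem.Set Int) (x : Int),
    (x ∈ l.foldl (fun next_res r =>
      PySem.Set.add (PySem.Set.add next_res (r + s)) (r - s)) acc) ↔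
    x ∈ acc ∨ ∃ r ∈ l, x = r + s ∨ x = r - s := by
  intro l
  induction l with
  | nil => intro acc x; simp
  | cons r t ih =>
    intro acc x
    simp only [List.foldl_cons, ih, PySem.Set.mem_add, List.mem_cons]
    constructor
    · rintro (((h | h) | h) | ⟨r', hr', h⟩)
      · exact Or.inl h
      · exact Or.inr ⟨r, Or.inl rfl, Or.inl h⟩
      · exact Or.inr ⟨r, Or.inl rfl, Or.inr h⟩
      · exact Or.inr ⟨r', Or.inr hr', h⟩
    · rintro (h | ⟨r', (rfl | hr'), h⟩)
      · exact Or.inl (Or.inl (Or.inl h))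
      · rcases h with h | h
        · exact Or.inl (Or.inl (Or.inr h))
        · exact Or.inl (Or.inr h)
      · exact Or.inr ⟨r', hr', h⟩


lemma foldA_mem (goal : Int) : ∀ (l : List Int) (res : PySem.Set Int),
    (goal ∈ l.foldl (fun res s =>
      res.foldl (fun next_res r =>
        PySem.Set.add (PySem.Set.add next_res (r + s)) (r - s)) PySem.Set.empty) res) ↔
    ∃ x ∈ res, Reach l (goal - x) := by
  intro l
  induction l with
  | nil => intro res; simp [Reach]
  | cons s t ih =>
    intro res
    simp only [List.foldl_cons, ih]
    constructor
    · rintro ⟨x, hx, hr⟩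
      rw [mem_inner] at hx
      rcases hx with h | ⟨r, hr', rfl | rfl⟩
      · simp [PySem.Set.empty] at h
      · exact ⟨r, hr', Or.inl (by rw [show goal - (r + s) = goal - r - s from by ring] at hr; exact hr)⟩
      · exact ⟨r, hr', Or.inr (by rw [show goal - (r - s) = goal - r + s from by ring] at hr; exact hr)⟩
    · rintro ⟨r, hr', h | h⟩
      · refine ⟨r + s, ?_, by rw [show goal - (r + s) = goal - r - s from by ring]; exact h⟩
        rw [mem_inner]; exact Or.inr ⟨r, hr', Or.inl rfl⟩
      · refine ⟨r - s, ?_, by rw [show goal - (r - s) = goal - r + s from by ring]; exact h⟩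
        rw [mem_inner]; exact Or.inr ⟨r, hr', Or.inr rfl⟩

lemma mem_sumsB : ∀ (l : List Int) (x : Int), x ∈ sumsB l ↔ Reach l x := by
  intro l
  induction l with
  | nil => intro x; simp [sumsB, Reach, PySem.Set.mem_ofList]
  | cons s t ih =>
    intro x
    simp only [sumsB, Reach, PySem.Set.mem_union, PySem.Set.mem_ofList, List.mem_map]
    constructor
    · rintro (⟨y, hy, rfl⟩ | ⟨y, hy, rfl⟩)
      · exact Or.inl (by rw [show y + s - s = y from by ring]; exact (ih y).mp hy)
      · exact Or.inr (by rw [show y - s + s = y from by ring]; exact (ih y).mp hy)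
    · rintro (h | h)
      · exact Or.inl ⟨x - s, (ih _).mpr h, by ring⟩
      · exact Or.inr ⟨x + s, (ih _).mpr h, by ring⟩

lemma reach_append : ∀ (l1 l2 : List Int) (d : Int),
    Reach (l1 ++ l2) d ↔ ∃ x, Reach l1 x ∧ Reach l2 (d - x) := by
  intro l1
  induction l1 with
  | nil =>
    intro l2 d
    simp [Reach]
  | cons s t ih =>
    intro l2 d
    simp only [List.cons_append, Reach, ih]
    constructor
    · rintro (⟨x, hx, h⟩ | ⟨x, hx, h⟩)
      · exact ⟨x + s, Or.inl (by rw [show x + s - s = x from by ring]; exact hx),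
          by rw [show d - (x + s) = d - s - x from by ring]; exact h⟩
      · exact ⟨x - s, Or.inr (by rw [show x - s + s = x from by ring]; exact hx),
          by rw [show d - (x - s) = d + s - x from by ring]; exact h⟩
    · rintro ⟨x, hx | hx, h⟩
      · exact Or.inl ⟨x - s, hx, by rw [show d - s - (x - s) = d - x from by ring]; exact h⟩
      · exact Or.inr ⟨x + s, hx, by rw [show d + s - (x + s) = d - x from by ring]; exact h⟩

-- ===== VERDICT (by name: the statement is the Claim_ definition above) =====
theorem f_spec : Claim_equal_f := by
  intro start goal steps _
  unfold Spec_f f f_alt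
  rw [Bool.eq_iff_iff]
  rw [PySem.Set.contains_iff, foldA_mem, List.any_eq_true]
  constructor
  · rintro ⟨x, hx, hr⟩
    have hx' : x = start := by
      have he : (PySem.Set.ofList [start] : PySem.Set Int) = [start] := rfl
      rw [he] at hx; simpa using hx
    subst hx'
    rw [show steps = steps.take (steps.length / 2) ++ steps.drop (steps.length / 2) from
      (List.take_append_drop _ _).symm] at hr
    rw [reach_append] at hr
    obtain ⟨y, hy, h2⟩ := hr
    refine ⟨y, (mem_sumsB _ _).mpr hy, ?_⟩
    rw [PySem.Set.contains_iff, mem_sumsB]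
    exact h2
  · rintro ⟨y, hy, hc⟩
    rw [PySem.Set.contains_iff, mem_sumsB] at hc
    rw [mem_sumsB] at hy
    refine ⟨start, ?_, ?_⟩
    · show start ∈ ([start] : List Int); simp
    · rw [show steps = steps.take (steps.length / 2) ++ steps.drop (steps.length / 2) from
        (List.take_append_drop _ _).symm]
      rw [reach_append]
      exact ⟨y, hy, hc⟩
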